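-- pv_equiv track=rewrite | github.com/ravip18596/universal-code-template-generators-api | src/template_service/generators/python.py | _dsl_to_py
-- ===== SOURCE A (Python) =====
-- def _dsl_to_py(type_token: str) -> str:
--     mapping = {
--         "int": "int",
--         "long": "int",
--         "float": "float",
--         "double": "float",
--         "bool": "bool",
--         "string": "str",
--         "Graph": "dict[int, list[int]]",
--     }
--     if type_token.endswith("[]"):
--         inner = _dsl_to_py(type_token[:-2])
--         return f"list[{inner}]"
--     if type_token.startswith("List<") and type_token.endswith(">"):
--         inner = _dsl_to_py(type_token[5:-1])
--         return f"list[{inner}]"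
--     if type_token.startswith("Tree<") and type_token.endswith(">"):
--         inner = _dsl_to_py(type_token[5:-1])
--         return f"Optional[TreeNode[{inner}]]"
--     return mapping.get(type_token, "Any")
-- ===== SOURCE B (Python) =====
-- def _dsl_to_py(type_token: str) -> str:
--     mapping = {
--         "int": "int",
--         "long": "int",
--         "float": "float",
--         "double": "float",
--         "bool": "bool",
--         "string": "str",
--         "Graph": "dict[int, list[int]]",
--     }
--
--     def step(token):
--         # classify one wrapper layer: (prefix, suffix) text and the inner token
--         if token.endswith("[]"):
--             return ("list[", "]"), token[:-2]
--         if token.startswith("List<") and token.endswith(">"):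
--             return ("list[", "]"), token[5:-1]
--         if token.startswith("Tree<") and token.endswith(">"):
--             return ("Optional[TreeNode[", "]]"), token[5:-1]
--         return None
--
--     pre, suf, token = "", "", type_token
--     r = step(token)
--     while r is not None:
--         (p, s), token = r
--         pre = pre + p
--         suf = s + suf
--         r = step(token)
--     return pre + mapping.get(token, "Any") + suf
-- ===== Notes on version B (the rewrite author's own statement) =====
-- stated objective: alternative
-- what changed: Replaces A's self-recursion (which rebuilds nested f-strings on the way back up) with a classifier that strips one wrapper at a time while a flat loop accumulates the output's prefix and suffix text directly, so the answer is a single pre + base + suf concatenation with no recursion and no rebuild pass.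
import Mathlib
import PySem

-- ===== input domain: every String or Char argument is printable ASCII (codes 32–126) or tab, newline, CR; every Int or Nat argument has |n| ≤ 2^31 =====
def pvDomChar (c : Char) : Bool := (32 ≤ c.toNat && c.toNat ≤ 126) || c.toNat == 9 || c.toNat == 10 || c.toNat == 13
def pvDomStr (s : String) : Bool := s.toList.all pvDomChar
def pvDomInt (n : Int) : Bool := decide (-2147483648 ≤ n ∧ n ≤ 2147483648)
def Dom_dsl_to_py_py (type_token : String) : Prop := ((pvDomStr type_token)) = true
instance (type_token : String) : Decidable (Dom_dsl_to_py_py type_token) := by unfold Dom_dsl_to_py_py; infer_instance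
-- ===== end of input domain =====

-- B replaces A's recursion by a one-layer classifier plus a flat loop that
-- accumulates the final string's prefix and suffix text directly
-- (objective: alternative decomposition, same cost); return values proved equal.

-- ===== PORT A =====
-- the `mapping` dict (same literal in A and B)
def pvMapping : PySem.Dict String String :=
  PySem.Dict.ofList
  [("int", "int"), ("long", "int"), ("float", "float"), ("double", "float"),
   ("bool", "bool"), ("string", "str"), ("Graph", "dict[int, list[int]]")]

-- termination facts for A's recursion (cited in decreasing_by)
theorem pv_peel2_lt (cs : List Char) (h : PySem.Chars.endswith cs ['[', ']'] = true) :
    (PySem.List.slice cs none (some (-2))).length < cs.length := by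
  rw [PySem.Chars.endswith_iff] at h
  have h2 : 2 ≤ cs.length := by
    obtain ⟨t, rfl⟩ := h
    simp
  simp [PySem.List.slice, PySem.List.clampIdx]
  split_ifs <;> omega

theorem pv_peel5_lt (cs : List Char) (h : PySem.Chars.startswith cs ['L', 'i', 's', 't', '<'] = true) :
    (PySem.List.slice cs (some 5) (some (-1))).length < cs.length := by
  rw [PySem.Chars.startswith_iff] at h
  have h5 : 5 ≤ cs.length := by
    obtain ⟨t, rfl⟩ := h
    simp
  simp [PySem.List.slice, PySem.List.clampIdx]
  split_ifs <;> omega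

theorem pv_peel5_lt' (cs : List Char) (h : PySem.Chars.startswith cs ['T', 'r', 'e', 'e', '<'] = true) :
    (PySem.List.slice cs (some 5) (some (-1))).length < cs.length := by
  rw [PySem.Chars.startswith_iff] at h
  have h5 : 5 ≤ cs.length := by
    obtain ⟨t, rfl⟩ := h
    simp
  simp [PySem.List.slice, PySem.List.clampIdx]
  split_ifs <;> omega

-- A's recursion, transliterated on the code points (branches in source order)
def pvDslA (cs : List Char) : String :=
  if h1 : PySem.Chars.endswith cs ['[', ']'] = true then
    "list[" ++ pvDslA (PySem.List.slice cs none (some (-2))) ++ "]"          -- type_token[:-2]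
  else if h2 : (PySem.Chars.startswith cs ['L', 'i', 's', 't', '<'] && PySem.Chars.endswith cs ['>']) = true then
    "list[" ++ pvDslA (PySem.List.slice cs (some 5) (some (-1))) ++ "]"      -- type_token[5:-1]
  else if h3 : (PySem.Chars.startswith cs ['T', 'r', 'e', 'e', '<'] && PySem.Chars.endswith cs ['>']) = true then
    "Optional[TreeNode[" ++ pvDslA (PySem.List.slice cs (some 5) (some (-1))) ++ "]]"
  else
    PySem.Dict.getD pvMapping (String.ofList cs) "Any"
termination_by cs.length
decreasing_by
  · exact pv_peel2_lt cs h1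
  · exact pv_peel5_lt cs (by simpa using (Bool.and_eq_true _ _ ▸ h2).1)
  · exact pv_peel5_lt' cs (by simpa using (Bool.and_eq_true _ _ ▸ h3).1)

def dsl_to_py_py (type_token : String) : String := pvDslA type_token.toList

-- ===== PORT B =====
-- B's `step`: classify one wrapper layer, returning ((prefix, suffix), inner) or None
def pvStep (token : List Char) : Option ((String × String) × List Char) :=
  if PySem.Chars.endswith token ['[', ']'] then
    some (("list[", "]"), PySem.List.slice token none (some (-2)))
  else if PySem.Chars.startswith token ['L', 'i', 's', 't', '<'] && PySem.Chars.endswith token ['>'] then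
    some (("list[", "]"), PySem.List.slice token (some 5) (some (-1)))
  else if PySem.Chars.startswith token ['T', 'r', 'e', 'e', '<'] && PySem.Chars.endswith token ['>'] then
    some (("Optional[TreeNode[", "]]"), PySem.List.slice token (some 5) (some (-1)))
  else
    none

-- the classifier strictly shrinks the token (cited in pvLoop's decreasing_by)
theorem pvStep_shrinks {token inner : List Char} {ps : String × String}
    (h : pvStep token = some (ps, inner)) : inner.length < token.length := by
  unfold pvStep at h
  split_ifs at h with h1 h2 h3
  · cases h; exact pv_peel2_lt token h1
  · cases h; exact pv_peel5_lt token (by simpa using (Bool.and_eq_true _ _ ▸ h2).1)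
  · cases h; exact pv_peel5_lt' token (by simpa using (Bool.and_eq_true _ _ ▸ h3).1)

-- B's while-loop over the classifier, carrying the growing prefix/suffix text
def pvLoop (token : List Char) (pre suf : String) : String :=
  match h : pvStep token with
  | some ((p, s), inner) => pvLoop inner (pre ++ p) (s ++ suf)
  | none => pre ++ PySem.Dict.getD pvMapping (String.ofList token) "Any" ++ suf
termination_by token.length
decreasing_by exact pvStep_shrinks h

def dsl_to_py_py_alt (type_token : String) : String := pvLoop type_token.toList "" ""

-- ===== PRECONDITION & SPEC =====
def Spec_dsl_to_py_py (type_token : String) (out : String) : Prop := out = dsl_to_py_py_alt type_token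
instance (type_token : String) (out : String) : Decidable (Spec_dsl_to_py_py type_token out) := by unfold Spec_dsl_to_py_py; infer_instance

-- ===== CLAIM (what is proved, stated in full; the proofs are below) =====
def Claim_equal_dsl_to_py_py : Prop := ∀ (type_token : String), Dom_dsl_to_py_py type_token → Spec_dsl_to_py_py type_token (dsl_to_py_py type_token)

-- ===== LEMMAS AND PROOFS =====
-- one-step unfoldings of B's loop, by the classifier's answer
theorem pvLoop_some {cs inner : List Char} {p s : String} (pre suf : String)
    (h : pvStep cs = some ((p, s), inner)) :
    pvLoop cs pre suf = pvLoop inner (pre ++ p) (s ++ suf) := by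
  rw [pvLoop]
  split <;> simp_all

theorem pvLoop_none {cs : List Char} (pre suf : String) (h : pvStep cs = none) :
    pvLoop cs pre suf = pre ++ PySem.Dict.getD pvMapping (String.ofList cs) "Any" ++ suf := by
  rw [pvLoop]
  split <;> simp_all

-- loop invariant: the loop computes the accumulated prefix/suffix wrapped around
-- A's value of the remaining token
theorem pv_main (n : Nat) : ∀ (cs : List Char), cs.length = n → ∀ (pre suf : String),
    pvLoop cs pre suf = pre ++ pvDslA cs ++ suf := by
  induction n using Nat.strong_induction_on with
  | _ n ih =>
    intro cs hlen pre suf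
    rw [pvDslA]
    by_cases h1 : PySem.Chars.endswith cs ['[', ']'] = true
    · rw [pvLoop_some pre suf (show pvStep cs = some (("list[", "]"), PySem.List.slice cs none (some (-2))) by simp [pvStep, h1]), dif_pos h1,
        ih _ (hlen ▸ pv_peel2_lt cs h1) _ rfl]
      simp [String.append_assoc]
    · by_cases h2 : (PySem.Chars.startswith cs ['L', 'i', 's', 't', '<'] && PySem.Chars.endswith cs ['>']) = true
      · rw [pvLoop_some pre suf (show pvStep cs = some (("list[", "]"), PySem.List.slice cs (some 5) (some (-1))) by simp [pvStep, h1, h2]), dif_neg h1, dif_pos h2,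
          ih _ (hlen ▸ pv_peel5_lt cs (by simpa using (Bool.and_eq_true _ _ ▸ h2).1)) _ rfl]
        simp [String.append_assoc]
      · by_cases h3 : (PySem.Chars.startswith cs ['T', 'r', 'e', 'e', '<'] && PySem.Chars.endswith cs ['>']) = true
        · rw [pvLoop_some pre suf (show pvStep cs = some (("Optional[TreeNode[", "]]"), PySem.List.slice cs (some 5) (some (-1))) by simp [pvStep, h1, h2, h3]), dif_neg h1, dif_neg h2, dif_pos h3,
            ih _ (hlen ▸ pv_peel5_lt' cs (by simpa using (Bool.and_eq_true _ _ ▸ h3).1)) _ rfl]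
          simp [String.append_assoc]
        · rw [pvLoop_none pre suf (by simp [pvStep, h1, h2, h3]), dif_neg h1, dif_neg h2, dif_neg h3]

-- ===== VERDICT (by name: the statement is the Claim_ definition above) =====
theorem dsl_to_py_py_spec : Claim_equal_dsl_to_py_py := by
  intro s _
  unfold Spec_dsl_to_py_py dsl_to_py_py dsl_to_py_py_alt
  have h := pv_main s.toList.length s.toList rfl "" ""
  simp at h
  exact h.symm
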